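-- pv_equiv track=rewrite | github.com/TizianSenger/InteractionSpeachToSpeach | voice_ui.py | _extract_complete_phrases
-- ===== SOURCE A (Python) =====
-- def _extract_complete_phrases(text_buffer: str) -> tuple[list[str], str]:
--     completed: list[str] = []
--     last_split_index = 0
--     phrase_end_chars = ",;:\n"
--
--     for index, char in enumerate(text_buffer):
--         if char in phrase_end_chars:
--             phrase = text_buffer[last_split_index : index + 1].strip()
--             if phrase:
--                 completed.append(phrase)
--             last_split_index = index + 1
--
--     remaining = text_buffer[last_split_index:]
--     return completed, remaining
-- ===== SOURCE B (Python) =====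
-- def _extract_complete_phrases(text_buffer: str) -> tuple[list[str], str]:
--     # Accumulate the current phrase's characters directly instead of tracking
--     # split indices and re-slicing the original buffer.
--     completed: list[str] = []
--     current = ""
--     for char in text_buffer:
--         current += char
--         if char in ",;:\n":
--             phrase = current.strip()
--             if phrase:
--                 completed.append(phrase)
--             current = ""
--     return completed, current
-- ===== Notes on version B (the rewrite author's own statement) =====
-- stated objective: simpler
-- what changed: B drops A's split-index bookkeeping and repeated slicing of the original buffer: it accumulates the current phrase's characters in a single running string, flushing it (stripped, if non-empty) whenever a delimiter is seen, and returns the leftover accumulator as the remainder.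
import Mathlib
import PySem

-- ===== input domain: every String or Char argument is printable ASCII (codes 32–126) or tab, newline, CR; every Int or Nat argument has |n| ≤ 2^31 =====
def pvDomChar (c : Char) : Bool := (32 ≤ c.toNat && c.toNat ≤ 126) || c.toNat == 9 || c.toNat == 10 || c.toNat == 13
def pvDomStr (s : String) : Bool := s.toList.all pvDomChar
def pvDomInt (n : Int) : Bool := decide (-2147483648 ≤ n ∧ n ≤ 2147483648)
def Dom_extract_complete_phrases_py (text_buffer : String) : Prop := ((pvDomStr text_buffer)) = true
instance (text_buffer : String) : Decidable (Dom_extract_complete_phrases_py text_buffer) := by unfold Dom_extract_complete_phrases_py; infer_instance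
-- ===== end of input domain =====

-- B replaces A's split-index bookkeeping and repeated slicing of the original buffer by
-- accumulating the current phrase's characters directly (objective: simpler; no speed claim).

-- ===== PORT A =====
-- the module constant ",;:\n" (phrase_end_chars)
def pvDelims : List Char := [',', ';', ':', '\n']

-- A's loop body: state = (completed, last_split_index); slices the original buffer
def pvStepA (full : List Char) (s : List String × Int) (p : Int × Char) : List String × Int :=
  if pvDelims.contains p.2 then
    let phrase := PySem.Chars.strip (PySem.List.slice full (some s.2) (some (p.1 + 1)))
    ((if phrase ≠ [] then s.1 ++ [String.ofList phrase] else s.1), p.1 + 1)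
  else s

def extract_complete_phrases_py (text_buffer : String) : List String × String :=
  let full := text_buffer.toList
  let st := (PySem.List.enumerate full 0).foldl (pvStepA full) ([], 0)
  (st.1, String.ofList (PySem.List.slice full (some st.2) none))

-- ===== PORT B =====
-- B's loop body: state = (completed, current phrase being accumulated)
def pvStepB (s : List String × List Char) (c : Char) : List String × List Char :=
  let cur := s.2 ++ [c]
  if pvDelims.contains c then
    let phrase := PySem.Chars.strip cur
    ((if phrase ≠ [] then s.1 ++ [String.ofList phrase] else s.1), [])
  else (s.1, cur)

def extract_complete_phrases_py_alt (text_buffer : String) : List String × String :=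
  let st := text_buffer.toList.foldl pvStepB ([], [])
  (st.1, String.ofList st.2)

-- ===== PRECONDITION & SPEC =====
def Spec_extract_complete_phrases_py (text_buffer : String) (out : List String × String) : Prop := out = extract_complete_phrases_py_alt text_buffer
instance (text_buffer : String) (out : List String × String) : Decidable (Spec_extract_complete_phrases_py text_buffer out) := by unfold Spec_extract_complete_phrases_py; infer_instance

-- ===== CLAIM (what is proved, stated in full; the proofs are below) =====
def Claim_equal_extract_complete_phrases_py : Prop := ∀ (text_buffer : String), Dom_extract_complete_phrases_py text_buffer → Spec_extract_complete_phrases_py text_buffer (extract_complete_phrases_py text_buffer)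

-- ===== LEMMAS AND PROOFS =====

-- Invariant: after processing the first k characters of `full`, A's state is
-- (acc, last) with last ≤ k, and B's current accumulator is full[last:k].
lemma ecp_inv (full : List Char) :
    ∀ (suff : List Char) (k last : Nat) (acc : List String),
      last ≤ k → full.drop k = suff →
      ∃ last' : Nat,
        last' ≤ k + suff.length ∧
        (PySem.List.enumerate suff (k : Int)).foldl (pvStepA full) (acc, (last : Int))
          = ((suff.foldl pvStepB (acc, (full.drop last).take (k - last))).1, (last' : Int)) ∧
        (suff.foldl pvStepB (acc, (full.drop last).take (k - last))).2
          = (full.drop last').take (k + suff.length - last') := by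
  intro suff
  induction suff with
  | nil =>
    intro k last acc hlk hdrop
    exact ⟨last, by omega, by simp [PySem.List.enumerate], by simp⟩
  | cons c rest ih =>
    intro k last acc hlk hdrop
    have hrest : full.drop (k + 1) = rest := by
      rw [← List.drop_drop, hdrop]; rfl
    have hdd : (full.drop last).drop (k - last) = c :: rest := by
      rw [List.drop_drop]
      have hlk' : last + (k - last) = k := by omega
      rw [hlk', hdrop]
    have hget : (full.drop last)[k - last]? = some c := by
      have := congrArg (·[0]?) hdd
      simpa [List.getElem?_drop] using this
    have hcur : (full.drop last).take (k - last) ++ [c]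
        = (full.drop last).take (k + 1 - last) := by
      have h1 : k + 1 - last = (k - last) + 1 := by omega
      rw [h1, List.take_add_one, hget]; rfl
    have hcast : (k : Int) + 1 = ((k + 1 : Nat) : Int) := by push_cast; ring
    rw [PySem.List.enumerate_cons]
    simp only [List.foldl_cons]
    by_cases h : pvDelims.contains c = true
    · -- delimiter step: both sides strip the same phrase full[last:k+1] and reset
      have hslice : PySem.List.slice full (some (last : Int)) (some (((k + 1 : Nat) : Int)))
          = (full.drop last).take (k + 1 - last) := by
        rw [PySem.List.slice_natCast]
      have hA : pvStepA full (acc, (last : Int)) ((k : Int), c)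
          = ((if PySem.Chars.strip ((full.drop last).take (k + 1 - last)) ≠ [] then
                acc ++ [String.ofList (PySem.Chars.strip ((full.drop last).take (k + 1 - last)))]
              else acc), ((k + 1 : Nat) : Int)) := by
        simp only [pvStepA, h, if_true, hcast, hslice]
      have hB : pvStepB (acc, (full.drop last).take (k - last)) c
          = ((if PySem.Chars.strip ((full.drop last).take (k + 1 - last)) ≠ [] then
                acc ++ [String.ofList (PySem.Chars.strip ((full.drop last).take (k + 1 - last)))]
              else acc), []) := by
        simp only [pvStepB, h, if_true, hcur]
      rw [hA, hB]
      obtain ⟨last', h1, h2, h3⟩ := ih (k + 1) (k + 1)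
        (if PySem.Chars.strip ((full.drop last).take (k + 1 - last)) ≠ [] then
            acc ++ [String.ofList (PySem.Chars.strip ((full.drop last).take (k + 1 - last)))]
          else acc) (le_refl _) hrest
      simp only [Nat.sub_self, List.take_zero] at h2 h3
      refine ⟨last', by simp; omega, h2, ?_⟩
      rw [h3]; congr 1; simp; omega
    · -- ordinary character: A's state is unchanged, B extends the accumulator
      have h' : c ∉ pvDelims := by simpa using h
      have hA : pvStepA full (acc, (last : Int)) ((k : Int), c) = (acc, (last : Int)) := by
        simp [pvStepA, h']
      have hB : pvStepB (acc, (full.drop last).take (k - last)) c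
          = (acc, (full.drop last).take (k + 1 - last)) := by
        simp [pvStepB, h', hcur]
      rw [hA, hB, hcast]
      obtain ⟨last', h1, h2, h3⟩ := ih (k + 1) last acc (by omega) hrest
      refine ⟨last', by simp; omega, h2, ?_⟩
      rw [h3]; congr 1; simp; omega

-- ===== VERDICT (by name: the statement is the Claim_ definition above) =====
theorem extract_complete_phrases_py_spec : Claim_equal_extract_complete_phrases_py := by
  intro text _hDom
  obtain ⟨last', hle, h2, h3⟩ := ecp_inv text.toList text.toList 0 0 [] (Nat.le_refl 0) rfl
  simp only [Nat.cast_zero, List.drop_zero, Nat.sub_zero, List.take_zero, Nat.zero_add] at h2 h3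
  simp only [Spec_extract_complete_phrases_py, extract_complete_phrases_py,
    extract_complete_phrases_py_alt]
  rw [h2, h3, PySem.List.slice_from_natCast]
  congr 1
  rw [List.take_of_length_le (by simp)]
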